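-- pv_equiv track=rewrite | github.com/sgl-project/sglang | test/srt/test_parallel_tokenizer.py | make_long_mixed_text
-- ===== SOURCE A (Python) =====
-- def make_long_mixed_text(min_length: int = 20000) -> str:
--     base = (
--         "Hello, 世界！This is a long text for ParallelTokenizer; 混合符号: "
--         "1234567890 ~!@#$%^&*()_+-=[]{}|;:'\"<>,./?\\ ` “中文引号” ‘单引号’ ，。！？；：\n\t"
--     )
--     s = []
--     while sum(len(x) for x in s) < min_length:
--         s.append(base)
--     return "".join(s)
-- ===== SOURCE B (Python) =====
-- def make_long_mixed_text(min_length: int = 20000) -> str: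
--     base = (
--         "Hello, 世界！This is a long text for ParallelTokenizer; 混合符号: "
--         "1234567890 ~!@#$%^&*()_+-=[]{}|;:'\"<>,./?\\ ` “中文引号” ‘单引号’ ，。！？；：\n\t"
--     )
--     return base * -(-min_length // len(base))
-- ===== Notes on version B (the rewrite author's own statement) =====
-- stated objective: faster
-- what changed: Replaces the while loop that re-sums the lengths of all accumulated chunks on every iteration with a closed-form ceiling division computing the number of copies, followed by a single string repetition.
import Mathlib
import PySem

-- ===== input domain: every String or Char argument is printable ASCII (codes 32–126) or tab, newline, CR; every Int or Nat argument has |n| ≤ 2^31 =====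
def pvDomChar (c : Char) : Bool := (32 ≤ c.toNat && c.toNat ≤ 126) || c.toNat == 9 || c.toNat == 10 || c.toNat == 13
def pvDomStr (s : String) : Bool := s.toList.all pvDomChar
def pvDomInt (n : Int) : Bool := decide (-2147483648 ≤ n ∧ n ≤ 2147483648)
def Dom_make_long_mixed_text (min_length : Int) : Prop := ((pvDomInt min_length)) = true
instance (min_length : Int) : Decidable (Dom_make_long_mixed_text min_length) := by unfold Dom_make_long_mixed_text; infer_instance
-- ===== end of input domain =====

-- B replaces A's length-resumming while loop by a closed-form ceiling division and one string repetition (asymptotically faster in the number of copies).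


-- ===== PORT A =====
-- the constant 'base' string of both programs (125 code points)
def pvBase : String :=
  "Hello, 世界！This is a long text for ParallelTokenizer; 混合符号: 1234567890 ~!@#$%^&*()_+-=[]{}|;:'\"<>,./?\\ ` “中文引号” ‘单引号’ ，。！？；：\n\t"

-- 'while sum(len(x) for x in s) < min_length: s.append(base)'
set_option maxRecDepth 4096 in
def pvLoopA (ml : Int) (s : List String) : List String :=
  if (s.map PySem.Str.len).sum < ml then pvLoopA ml (s ++ [pvBase]) else s
termination_by (ml - (s.map PySem.Str.len).sum).toNat
decreasing_by
  have hb : PySem.Str.len pvBase = 125 := by decide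
  simp only [List.map_append, List.sum_append, List.map_cons, List.map_nil, List.sum_cons,
    List.sum_nil, hb]
  omega

def make_long_mixed_text (min_length : Int) : String :=
  PySem.Str.join "" (pvLoopA min_length [])

-- ===== PORT B =====
-- 'base * n' (Python str * int: n ≤ 0 gives ""); ported by hand, exact: n.toNat copies joined
def pvStrMul (s : String) (n : Int) : String :=
  PySem.Str.join "" (List.replicate n.toNat s)

def make_long_mixed_text_alt (min_length : Int) : String :=
  pvStrMul pvBase (-(PySem.Int.floordiv (-min_length) (PySem.Str.len pvBase)))

-- ===== PRECONDITION & SPEC =====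
def Spec_make_long_mixed_text (min_length : Int) (out : String) : Prop := out = make_long_mixed_text_alt min_length
instance (min_length : Int) (out : String) : Decidable (Spec_make_long_mixed_text min_length out) := by unfold Spec_make_long_mixed_text; infer_instance

-- ===== CLAIM (what is proved, stated in full; the proofs are below) =====
def Claim_equal_make_long_mixed_text : Prop := ∀ (min_length : Int), Dom_make_long_mixed_text min_length → Spec_make_long_mixed_text min_length (make_long_mixed_text min_length)

-- ===== LEMMAS AND PROOFS =====

set_option maxRecDepth 4096 in
theorem pvBase_len : PySem.Str.len pvBase = 125 := by decide

theorem sum_len_replicate (k : Nat) :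
    ((List.replicate k pvBase).map PySem.Str.len).sum = (k : Int) * 125 := by
  induction k with
  | zero => simp
  | succ k ih =>
    rw [List.replicate_succ]
    simp only [List.map_cons, List.sum_cons, ih, pvBase_len]
    push_cast; ring

-- the closed-form copy count of B, as a Nat
def pvCount (ml : Int) : Nat := (-(PySem.Int.floordiv (-ml) 125)).toNat

theorem pvCount_spec (ml : Int) (k : Nat) :
    (k : Int) * 125 < ml ↔ k < pvCount ml := by
  have h : (-(PySem.Int.floordiv (-ml) 125) : Int) = -((-ml) / 125) := by
    rw [PySem.Int.floordiv_eq_ediv_of_pos (by norm_num)]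
  have hle : ∀ q : Int, q ≤ (-ml) / 125 ↔ q * 125 ≤ -ml := by
    intro q
    exact Int.le_ediv_iff_mul_le (by norm_num)
  unfold pvCount
  rw [h]
  constructor
  · intro hlt
    have : ¬ ((-(k : Int)) ≤ (-ml) / 125) := by
      rw [hle]; omega
    omega
  · intro hlt
    have h2 : ¬ ((-(k : Int)) ≤ (-ml) / 125) := by omega
    rw [hle] at h2; omega

theorem pvLoopA_replicate (ml : Int) :
    ∀ (n k : Nat), (ml - (k : Int) * 125).toNat ≤ n →
      pvLoopA ml (List.replicate k pvBase) = List.replicate (max k (pvCount ml)) pvBase := by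
  intro n
  induction n with
  | zero =>
    intro k hk
    rw [pvLoopA]
    have hsum := sum_len_replicate k
    have hnotlt : ¬ ((k : Int) * 125 < ml) := by omega
    rw [hsum, if_neg hnotlt]
    have : pvCount ml ≤ k := by
      by_contra hc
      exact hnotlt ((pvCount_spec ml k).mpr (by omega))
    rw [Nat.max_eq_left this]
  | succ n ih =>
    intro k hk
    rw [pvLoopA]
    have hsum := sum_len_replicate k
    rw [hsum]
    by_cases hlt : (k : Int) * 125 < ml
    · rw [if_pos hlt]
      have hrep : List.replicate k pvBase ++ [pvBase] = List.replicate (k + 1) pvBase := by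
        rw [← List.replicate_succ']
      rw [hrep, ih (k + 1) (by push_cast; omega)]
      have hkc : k < pvCount ml := (pvCount_spec ml k).mp hlt
      rw [Nat.max_eq_right (by omega), Nat.max_eq_right (by omega)]
    · rw [if_neg hlt]
      have : pvCount ml ≤ k := by
        by_contra hc
        exact hlt ((pvCount_spec ml k).mpr (by omega))
      rw [Nat.max_eq_left this]

-- ===== VERDICT (by name: the statement is the Claim_ definition above) =====
theorem make_long_mixed_text_spec : Claim_equal_make_long_mixed_text := by
  unfold Claim_equal_make_long_mixed_text
  intro ml _
  unfold Spec_make_long_mixed_text make_long_mixed_text make_long_mixed_text_alt pvStrMul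
  have h0 : ([] : List String) = List.replicate 0 pvBase := rfl
  rw [h0, pvLoopA_replicate ml (ml - 0 * 125).toNat 0 (le_refl _), pvBase_len]
  simp [pvCount]
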